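-- pv_equiv track=rewrite | github.com/ApurboSaha-cse/Cryptography_Lab | Lab4.py | double_transposition_decrypt_dynamic
-- ===== SOURCE A (Python) =====
-- def double_transposition_decrypt_dynamic(cipher, row_key, col_key, rows, cols):
--     inverse_col = [0]*len(col_key)
--     for i, k in enumerate(col_key):
--         inverse_col[k] = i
--
--     inverse_row = [0]*len(row_key)
--     for i, k in enumerate(row_key):
--         inverse_row[k] = i
--
--     # Break into grid
--     grid = [cipher[i:i+cols] for i in range(0, len(cipher), cols)]
--     # Reverse column transposition
--     grid = [''.join([row[i] for i in inverse_col]) for row in grid]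
--     # Reverse row transposition
--     grid = [grid[i] for i in inverse_row]
--
--     plaintext = ''.join(grid)
--     return plaintext.rstrip('X')  # remove padding
-- ===== SOURCE B (Python) =====
-- def double_transposition_decrypt_dynamic(cipher, row_key, col_key, rows, cols):
--     inverse_col = [0]*len(col_key)
--     for i, k in enumerate(col_key):
--         inverse_col[k] = i
--
--     inverse_row = [0]*len(row_key)
--     for i, k in enumerate(row_key):
--         inverse_row[k] = i
--
--     # Compose the two inverse permutations directly over the flat string:
--     # output row j, column c comes from cipher[inverse_row[j]*cols + inverse_col[c]].
--     plaintext = ''.join(cipher[r*cols + c] for r in inverse_row for c in inverse_col)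
--     return plaintext.rstrip('X')  # remove padding
-- ===== Notes on version B (the rewrite author's own statement) =====
-- stated objective: simpler
-- what changed: B drops the intermediate grid entirely: instead of slicing cipher into rows, permuting each row's columns and then reordering the rows, it reads each output character directly from the flat string at index inverse_row[j]*cols + inverse_col[c] in one comprehension.
import Mathlib
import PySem

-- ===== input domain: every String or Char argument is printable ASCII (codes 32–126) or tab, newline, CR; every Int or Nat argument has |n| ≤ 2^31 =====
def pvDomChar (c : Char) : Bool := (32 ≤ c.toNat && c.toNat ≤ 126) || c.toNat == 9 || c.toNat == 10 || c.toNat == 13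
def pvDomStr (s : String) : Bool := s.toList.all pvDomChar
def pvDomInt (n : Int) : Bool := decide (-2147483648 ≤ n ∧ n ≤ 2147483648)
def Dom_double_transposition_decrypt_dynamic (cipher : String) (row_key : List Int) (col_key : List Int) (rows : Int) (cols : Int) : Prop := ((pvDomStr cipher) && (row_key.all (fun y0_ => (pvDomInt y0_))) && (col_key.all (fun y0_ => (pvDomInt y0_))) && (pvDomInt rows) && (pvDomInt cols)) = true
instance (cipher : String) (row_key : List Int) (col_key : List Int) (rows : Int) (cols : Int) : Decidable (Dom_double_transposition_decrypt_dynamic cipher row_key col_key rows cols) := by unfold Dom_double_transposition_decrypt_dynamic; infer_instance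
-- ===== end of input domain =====

-- B replaces A's three shaped passes over an intermediate grid (slice into rows, permute each
-- row's columns, reorder the rows) with one flat pass reading cipher[inverse_row[j]*cols +
-- inverse_col[c]] directly; same cost, simpler decomposition. Return-value equivalence on Pre_.

-- shared hand port of the identical inverse-key loop both Pythons contain:
-- inv = [0]*len(key); for i, k in enumerate(key): inv[k] = i
def pvInvKey (key : List Int) : List Int :=
  (PySem.List.enumerate key 0).foldl (fun acc p => PySem.List.pySetD acc p.2 p.1)
    (List.replicate key.length (0 : Int))

-- hand port of s.rstrip('X'): drop the trailing 'X' characters (exact: rstrip with a one-char set)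
def pvRstripX (cs : List Char) : List Char :=
  (cs.reverse.dropWhile (fun c => c == 'X')).reverse

-- ===== PORT A =====
def double_transposition_decrypt_dynamic (cipher : String) (row_key : List Int) (col_key : List Int) (rows : Int) (cols : Int) : String :=
  let inverse_col := pvInvKey col_key
  let inverse_row := pvInvKey row_key
  let cs := cipher.toList
  -- grid = [cipher[i:i+cols] for i in range(0, len(cipher), cols)]
  let grid : List (List Char) :=
    (PySem.List.pyRange 0 (cs.length : Int) cols).map
      (fun i => PySem.List.slice cs (some i) (some (i + cols)))
  -- grid = [''.join([row[i] for i in inverse_col]) for row in grid]  (row[i] via pyGetD; in range under Pre_)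
  let grid2 : List (List Char) :=
    grid.map (fun row => inverse_col.map (fun i => PySem.List.pyGetD row i ' '))
  -- grid = [grid[i] for i in inverse_row]  (grid[i] via pyGetD; in range under Pre_)
  let grid3 : List (List Char) := inverse_row.map (fun i => PySem.List.pyGetD grid2 i [])
  String.ofList (pvRstripX grid3.flatten)

-- ===== PORT B =====
def double_transposition_decrypt_dynamic_alt (cipher : String) (row_key : List Int) (col_key : List Int) (rows : Int) (cols : Int) : String :=
  let inverse_col := pvInvKey col_key
  let inverse_row := pvInvKey row_key
  let cs := cipher.toList
  -- ''.join(cipher[r*cols + c] for r in inverse_row for c in inverse_col)  (cipher[...] via pyGetD; in range under Pre_)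
  let chars : List Char :=
    inverse_row.flatMap (fun r => inverse_col.map (fun c => PySem.List.pyGetD cs (r * cols + c) ' '))
  String.ofList (pvRstripX chars)

-- ===== PRECONDITION & SPEC =====
-- Pre_ is exactly the closed-form description of the inputs on which the Python A returns
-- normally (key entries are valid Python indices; range(0, len, cols) does not raise; every
-- grid row is long enough for the column pass; every row index used hits an existing grid row);
-- outside it A raises ValueError or IndexError.
def Pre_double_transposition_decrypt_dynamic (cipher : String) (row_key : List Int) (col_key : List Int) (rows : Int) (cols : Int) : Prop :=
  (∀ k ∈ row_key, -(row_key.length : Int) ≤ k ∧ k < (row_key.length : Int)) ∧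
  (∀ k ∈ col_key, -(col_key.length : Int) ≤ k ∧ k < (col_key.length : Int)) ∧
  cols ≠ 0 ∧
  (cols < 0 → row_key = []) ∧
  (0 < cols →
    (col_key = [] ∨ cipher.toList.length = 0 ∨
      ((col_key.length : Int) ≤ cols ∧
        ((cipher.toList.length : Int) % cols = 0 ∨
          (col_key.length : Int) ≤ (cipher.toList.length : Int) % cols))) ∧
    (row_key = [] ∨
      (row_key.length : Int) ≤ ((cipher.toList.length : Int) + cols - 1) / cols))
instance (cipher : String) (row_key : List Int) (col_key : List Int) (rows : Int) (cols : Int) : Decidable (Pre_double_transposition_decrypt_dynamic cipher row_key col_key rows cols) := by unfold Pre_double_transposition_decrypt_dynamic; infer_instance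

def pvWitness_double_transposition_decrypt_dynamic : String × List Int × List Int × Int × Int :=
  ("BAXD", [1, 0], [1, 0], 0, 2)

def Spec_double_transposition_decrypt_dynamic (cipher : String) (row_key : List Int) (col_key : List Int) (rows : Int) (cols : Int) (out : String) : Prop := out = double_transposition_decrypt_dynamic_alt cipher row_key col_key rows cols
instance (cipher : String) (row_key : List Int) (col_key : List Int) (rows : Int) (cols : Int) (out : String) : Decidable (Spec_double_transposition_decrypt_dynamic cipher row_key col_key rows cols out) := by unfold Spec_double_transposition_decrypt_dynamic; infer_instance

-- ===== CLAIM (what is proved, stated in full; the proofs are below) =====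
def Claim_equal_double_transposition_decrypt_dynamic : Prop := ∀ (cipher : String) (row_key : List Int) (col_key : List Int) (rows : Int) (cols : Int), Dom_double_transposition_decrypt_dynamic cipher row_key col_key rows cols → Pre_double_transposition_decrypt_dynamic cipher row_key col_key rows cols → Spec_double_transposition_decrypt_dynamic cipher row_key col_key rows cols (double_transposition_decrypt_dynamic cipher row_key col_key rows cols)

-- ===== LEMMAS AND PROOFS =====

-- any element of xs with xs[i] = v set is an old element or v (any i: in-range, negative, or out of range)
theorem pvMem_pySetD {w : Int} (xs : List Int) (i : Int) (v : Int)
    (hw : w ∈ PySem.List.pySetD xs i v) : w ∈ xs ∨ w = v := by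
  unfold PySem.List.pySetD PySem.List.pySet? at hw
  rcases h : PySem.List.pyIdx? xs.length i with _ | k
  · rw [h] at hw; exact Or.inl hw
  · rw [h] at hw; exact List.mem_or_eq_of_mem_set hw

theorem pvFoldl_pySetD_mem (n : Nat) : ∀ (l : List (Int × Int)) (acc : List Int),
    (∀ p ∈ l, 0 ≤ p.1 ∧ p.1 < (n : Int)) →
    (∀ v ∈ acc, 0 ≤ v ∧ v < (n : Int)) →
    ∀ v ∈ l.foldl (fun acc p => PySem.List.pySetD acc p.2 p.1) acc, 0 ≤ v ∧ v < (n : Int) := by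
  intro l
  induction l with
  | nil => intro acc _ hacc v hv; exact hacc v hv
  | cons p t ih =>
    intro acc hl hacc v hv
    refine ih _ (fun q hq => hl q (List.mem_cons_of_mem _ hq)) ?_ v hv
    intro w hw
    have hw' : w ∈ PySem.List.pySetD acc p.2 p.1 := hw
    rcases pvMem_pySetD acc p.2 p.1 hw' with h | h
    · exact hacc w h
    · exact h ▸ hl p List.mem_cons_self

-- every entry of the inverse array is a valid non-negative row/column index
theorem pvInvKey_mem {key : List Int}
    {v : Int} (hv : v ∈ pvInvKey key) : 0 ≤ v ∧ v < (key.length : Int) := by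
  refine pvFoldl_pySetD_mem key.length _ _ ?_ ?_ v hv
  · intro p hp
    rw [PySem.List.mem_enumerate_iff] at hp
    obtain ⟨k, hk', rfl⟩ := hp
    exact ⟨by simp, by simp; exact_mod_cast hk'⟩
  · intro w hw
    obtain ⟨hne, rfl⟩ := List.mem_replicate.mp hw
    exact ⟨le_refl 0, by exact_mod_cast Nat.pos_of_ne_zero hne⟩

-- range(0, L, cn) for positive cn is the list of row starts cn*j, j < ceil(L/cn)
theorem pvGrid_range {L cn : Nat} (hcn : 0 < cn) (hL : 0 < L) :
    PySem.List.pyRange 0 (L : Int) (cn : Int)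
      = (List.range ((L + cn - 1) / cn)).map (fun j => ((cn * j : Nat) : Int)) := by
  rw [PySem.List.pyRange_of_pos _ _ (by exact_mod_cast hcn)]
  have h1 : (if (0:Int) < (L:Int) then (((L:Int) - 0 + cn - 1) / (cn:Int)).toNat else 0)
      = (L + cn - 1) / cn := by
    rw [if_pos (by exact_mod_cast hL)]
    have h2 : ((L:Int) - 0 + cn - 1) = ((L + cn - 1 : Nat) : Int) := by omega
    rw [h2, ← Int.natCast_ediv, Int.toNat_natCast]
  rw [h1]
  refine List.map_congr_left fun k hk => by push_cast; ring

-- every used cell of row j fits: cn*j + C ≤ L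
theorem pvRowFit {L cn C j : Nat} (hcn : 0 < cn) (hC : C ≤ cn)
    (hmod : L % cn = 0 ∨ C ≤ L % cn) (hj : j < (L + cn - 1) / cn) : cn * j + C ≤ L := by
  have hqm : cn * (L / cn) + L % cn = L := Nat.div_add_mod L cn
  have hm : L % cn < cn := Nat.mod_lt _ hcn
  have hsplit : L + cn - 1 = cn * (L / cn) + (L % cn + cn - 1) := by omega
  have hN : (L + cn - 1) / cn = L / cn + (L % cn + cn - 1) / cn := by
    rw [hsplit, Nat.mul_add_div hcn]
  rcases Nat.eq_zero_or_pos (L % cn) with hm0 | hmpos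
  · have : (L % cn + cn - 1) / cn = 0 := Nat.div_eq_of_lt (by omega)
    have hjq : j + 1 ≤ L / cn := by omega
    calc cn * j + C ≤ cn * j + cn := by omega
      _ = cn * (j + 1) := by ring
      _ ≤ cn * (L / cn) := Nat.mul_le_mul_left cn hjq
      _ ≤ L := by omega
  · have hCm : C ≤ L % cn := by
      rcases hmod with h | h
      · omega
      · exact h
    have : (L % cn + cn - 1) / cn = 1 := Nat.div_eq_of_lt_le (by omega) (by omega)
    have hjq : j ≤ L / cn := by omega
    calc cn * j + C ≤ cn * (L / cn) + L % cn := by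
          have := Nat.mul_le_mul_left cn hjq; omega
      _ = L := hqm

theorem pv_main (cipher : String) (row_key col_key : List Int) (rows cols : Int)
    (h : Pre_double_transposition_decrypt_dynamic cipher row_key col_key rows cols) :
    double_transposition_decrypt_dynamic cipher row_key col_key rows cols
      = double_transposition_decrypt_dynamic_alt cipher row_key col_key rows cols := by
  obtain ⟨hrk, hck, hcne, hneg, hpos⟩ := h
  rcases List.eq_nil_or_concat row_key with hR0 | hRne
  · -- no rows: both sides reorder an empty inverse_row list and return ''
    subst hR0; rfl
  have hRpos : 0 < row_key.length := by
    obtain ⟨l, a, rfl⟩ := hRne; simp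
  have hcolpos : 0 < cols := by
    rcases lt_trichotomy cols 0 with h | h | h
    · exact absurd (hneg h) (by rintro rfl; simp at hRpos)
    · exact absurd h hcne
    · exact h
  obtain ⟨hcolOK, hrowOK⟩ := hpos hcolpos
  have hrowN : (row_key.length : Int) ≤ ((cipher.toList.length : Int) + cols - 1) / cols := by
    rcases hrowOK with h | h
    · exact absurd h (by rintro rfl; simp at hRpos)
    · exact h
  set cn := cols.toNat with hcndef
  have hcn : cols = (cn : Int) := (Int.toNat_of_nonneg hcolpos.le).symm
  have hcnpos : 0 < cn := by omega
  set L := cipher.toList.length with hLdef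
  set N := (L + cn - 1) / cn with hNdef
  have hNcast : (((L:Int) + cols - 1) / cols) = (N : Int) := by
    rw [hcn]
    have h2 : ((L:Int) + (cn:Int) - 1) = ((L + cn - 1 : Nat) : Int) := by omega
    rw [h2, ← Int.natCast_ediv]
  have hRN : row_key.length ≤ N := by
    rw [hNcast] at hrowN; exact_mod_cast hrowN
  have hL : 0 < L := by
    by_contra hL0
    have : L = 0 := by omega
    simp [this] at hNdef
    have : N = 0 := by rw [hNdef]; exact Nat.div_eq_of_lt (by omega)
    omega
  unfold double_transposition_decrypt_dynamic double_transposition_decrypt_dynamic_alt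
  simp only []
  congr 2
  rw [List.flatMap_def]
  congr 1
  refine List.map_congr_left fun r hr => ?_
  obtain ⟨hr0, hrR⟩ := pvInvKey_mem hr
  rw [← hLdef, hcn, pvGrid_range hcnpos hL, ← hNdef]
  set cs := cipher.toList with hcs
  have hrlt : r.toNat < N := by omega
  have hget : PySem.List.pyGetD
      ((((List.range N).map (fun j => ((cn * j : Nat) : Int))).map
          (fun i => PySem.List.slice cs (some i) (some (i + (cn : Int))))).map
        (fun row => (pvInvKey col_key).map (fun i => PySem.List.pyGetD row i ' '))) r []
      = (pvInvKey col_key).map (fun c =>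
          PySem.List.pyGetD (PySem.List.slice cs (some ((cn * r.toNat : Nat) : Int))
            (some (((cn * r.toNat : Nat) : Int) + (cn : Int)))) c ' ') := by
    rw [PySem.List.pyGetD_eq_getElem _ _ hr0 (by simp; omega)]
    simp
  rw [hget]
  refine List.map_congr_left fun c hc => ?_
  obtain ⟨hc0, hcC⟩ := pvInvKey_mem hc
  have hCpos : 0 < col_key.length := by omega
  have hcolOK' : (col_key.length : Int) ≤ cols ∧
      ((L : Int) % cols = 0 ∨ (col_key.length : Int) ≤ (L : Int) % cols) := by
    rcases hcolOK with h | h | h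
    · exact absurd h (by rintro rfl; simp at hCpos)
    · omega
    · exact h
  have hCcn : col_key.length ≤ cn := by
    have := hcolOK'.1; omega
  have hmodN : L % cn = 0 ∨ col_key.length ≤ L % cn := by
    have h2 : ((L : Int) % cols) = ((L % cn : Nat) : Int) := by
      rw [hcn, ← Int.natCast_emod]
    rcases hcolOK'.2 with h | h
    · left; rw [h2] at h; exact_mod_cast h
    · right; rw [h2] at h; exact_mod_cast h
  have hfit : cn * r.toNat + col_key.length ≤ L := pvRowFit hcnpos hCcn hmodN hrlt
  have hslice : PySem.List.slice cs (some ((cn * r.toNat : Nat) : Int))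
      (some (((cn * r.toNat : Nat) : Int) + (cn : Int)))
      = (cs.drop (cn * r.toNat)).take cn := by
    exact_mod_cast PySem.List.slice_natCast_add cs (cn * r.toNat) cn
  rw [hslice]
  have hdroplen : ((cs.drop (cn * r.toNat)).take cn).length = min cn (L - cn * r.toNat) := by
    simp [hLdef]
  rw [PySem.List.pyGetD_eq_getElem _ _ hc0
        (by
          rw [hdroplen]
          have hfit' := hfit
          generalize cn * r.toNat = M at hfit' ⊢
          omega),
      PySem.List.pyGetD_eq_getElem _ _ (by positivity)
        (by
          have hmul : r * (cn : Int) = ((cn * r.toNat : Nat) : Int) := by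
            push_cast [Int.toNat_of_nonneg hr0]; ring
          rw [hmul]
          have hLen : ((cs.length : Nat) : Int) = ((L : Nat) : Int) := rfl
          rw [hLen]
          have hfit' := hfit
          generalize cn * r.toNat = M at hfit' ⊢
          omega)]
  rw [List.getElem_take, List.getElem_drop]
  congr 1
  have hcast : r * (cn : Int) + c = ((r.toNat * cn + c.toNat : Nat) : Int) := by
    push_cast [Int.toNat_of_nonneg hr0, Int.toNat_of_nonneg hc0]; ring
  rw [hcast, Int.toNat_natCast]
  ring

-- ===== VERDICT (by name: the statement is the Claim_ definition above) =====
theorem double_transposition_decrypt_dynamic_spec : Claim_equal_double_transposition_decrypt_dynamic := by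
  intro cipher row_key col_key rows cols _hdom hpre
  exact pv_main cipher row_key col_key rows cols hpre
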